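-- pv_equiv track=rewrite | github.com/zil54/chess_analyzer | app/backend/svg/svg.py | generate_board_svg
-- ===== SOURCE A (Python) =====
-- def piece_icon(piece: str) -> str:
--     color = "w" if piece.isupper() else "b"
--     name = piece.upper()
--     return f"/static/pieces/{color}{name}.svg"
--
-- def generate_board_svg(fen: str) -> str:
--     square_size = 52
--     board_size = 8 * square_size
--     light_color = "#f0d9b5"
--     dark_color = "#b58863"
--
--     rows = fen.split(" ")[0].split("/")
--     svg = [f'<svg xmlns="http://www.w3.org/2000/svg" width="{board_size}" height="{board_size}">']
--
--     for rank_index, row in enumerate(rows):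
--         file_index = 0
--
--         for char in row:
--             if char.isdigit():
--                 for _ in range(int(char)):
--                     x = file_index * square_size
--                     y = rank_index * square_size
--                     is_light = (rank_index + file_index) % 2 == 0
--                     fill = light_color if is_light else dark_color
--                     svg.append(f'<rect x="{x}" y="{y}" width="{square_size}" height="{square_size}" fill="{fill}"/>')
--                     file_index += 1
--             else:
--                 x = file_index * square_size
--                 y = rank_index * square_size
--                 is_light = (rank_index + file_index) % 2 == 0
--                 fill = light_color if is_light else dark_color
--                 svg.append(f'<rect x="{x}" y="{y}" width="{square_size}" height="{square_size}" fill="{fill}"/>')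
--
--                 icon_path = piece_icon(char)
--                 svg.append(
--                     f'<image href="{icon_path}" x="{x + 5}" y="{y + 5}" width="{square_size - 10}" height="{square_size - 10}"/>'
--                 )
--                 file_index += 1
--
--     svg.append('</svg>')
--     return "\n".join(svg)
-- ===== SOURCE B (Python) =====
-- def piece_icon(piece: str) -> str:
--     color = "w" if piece.isupper() else "b"
--     name = piece.upper()
--     return f"/static/pieces/{color}{name}.svg"
--
-- def generate_board_svg(fen: str) -> str:
--     sq = 52
--     # pre-expand each rank: digit N -> N empty cells, any other char -> one occupied cell
--     grid = [
--         [cell for ch in row for cell in (int(ch) * [None] if ch.isdigit() else [ch])]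
--         for row in fen.split(" ")[0].split("/")
--     ]
--     lines = [f'<svg xmlns="http://www.w3.org/2000/svg" width="{8 * sq}" height="{8 * sq}">']
--     for r, cells in enumerate(grid):
--         for f, cell in enumerate(cells):
--             x, y = f * sq, r * sq
--             fill = "#f0d9b5" if (r + f) % 2 == 0 else "#b58863"
--             lines.append(f'<rect x="{x}" y="{y}" width="{sq}" height="{sq}" fill="{fill}"/>')
--             if cell is not None:
--                 lines.append(
--                     f'<image href="{piece_icon(cell)}" x="{x + 5}" y="{y + 5}" width="{sq - 10}" height="{sq - 10}"/>'
--                 )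
--     lines.append('</svg>')
--     return "\n".join(lines)
-- ===== Notes on version B (the rewrite author's own statement) =====
-- stated objective: simpler
-- what changed: B pre-expands each FEN rank into a flat list of cells (digit N -> N empty cells) and then emits all squares in one uniform enumerate loop, removing A's duplicated rect-emitting code and its nested range(int(char)) inner loop.
import Mathlib
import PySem

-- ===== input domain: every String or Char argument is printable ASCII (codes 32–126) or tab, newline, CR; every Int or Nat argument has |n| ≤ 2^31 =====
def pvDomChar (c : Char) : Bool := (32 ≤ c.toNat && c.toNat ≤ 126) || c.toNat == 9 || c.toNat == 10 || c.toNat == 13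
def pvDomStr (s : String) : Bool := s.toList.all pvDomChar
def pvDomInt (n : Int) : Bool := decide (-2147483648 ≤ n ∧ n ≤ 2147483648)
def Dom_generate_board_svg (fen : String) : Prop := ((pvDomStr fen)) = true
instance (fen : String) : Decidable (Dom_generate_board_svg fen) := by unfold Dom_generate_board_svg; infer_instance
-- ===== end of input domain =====

-- B collapses A's duplicated rect-emitting branches: it first expands each rank into a
-- flat list of cells (digit N -> N empty cells) and then emits uniformly; objective: simpler.

-- ===== PORT A =====
-- shared module helper (Python's piece_icon; called on one-character strings, so Char here)
def piece_icon (piece : Char) : String :=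
  let color := if PySem.Chars.isupper piece then "w" else "b"
  let name := String.ofList [PySem.Chars.upperChar piece]
  "/static/pieces/" ++ color ++ name ++ ".svg"

-- body of A's inner `for _ in range(int(char))` loop; square_size = 52 inlined (a constant)
def pvA_digitStep (rank_index : Int) (st : Int × List String) (_i : Int) : Int × List String :=
  let file_index := st.1
  let svg := st.2
  let x := file_index * 52
  let y := rank_index * 52
  let is_light := (rank_index + file_index) % 2 == 0
  let fill := if is_light then "#f0d9b5" else "#b58863"
  (file_index + 1,
    svg ++ ["<rect x=\"" ++ PySem.Int.toStr x ++ "\" y=\"" ++ PySem.Int.toStr y ++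
            "\" width=\"" ++ PySem.Int.toStr 52 ++ "\" height=\"" ++ PySem.Int.toStr 52 ++
            "\" fill=\"" ++ fill ++ "\"/>"])

-- body of A's `for char in row` loop; int(char) via ofChars? (isdigit guarantees `some`, getD 0 unused)
def pvA_charStep (rank_index : Int) (st : Int × List String) (char : Char) : Int × List String :=
  if PySem.Chars.isdigit char then
    (PySem.List.pyRange 0 ((PySem.Int.ofChars? [char]).getD 0) 1).foldl (pvA_digitStep rank_index) st
  else
    let file_index := st.1
    let svg := st.2
    let x := file_index * 52
    let y := rank_index * 52
    let is_light := (rank_index + file_index) % 2 == 0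
    let fill := if is_light then "#f0d9b5" else "#b58863"
    let svg := svg ++ ["<rect x=\"" ++ PySem.Int.toStr x ++ "\" y=\"" ++ PySem.Int.toStr y ++
            "\" width=\"" ++ PySem.Int.toStr 52 ++ "\" height=\"" ++ PySem.Int.toStr 52 ++
            "\" fill=\"" ++ fill ++ "\"/>"]
    let icon_path := piece_icon char
    let svg := svg ++ ["<image href=\"" ++ icon_path ++ "\" x=\"" ++ PySem.Int.toStr (x + 5) ++
            "\" y=\"" ++ PySem.Int.toStr (y + 5) ++ "\" width=\"" ++ PySem.Int.toStr (52 - 10) ++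
            "\" height=\"" ++ PySem.Int.toStr (52 - 10) ++ "\"/>"]
    (file_index + 1, svg)

-- body of A's `for rank_index, row in enumerate(rows)` loop (file_index restarts at 0)
def pvA_rankStep (svg : List String) (p : Int × String) : List String :=
  (p.2.toList.foldl (pvA_charStep p.1) (0, svg)).2

def generate_board_svg (fen : String) : String :=
  let board_size : Int := 8 * 52
  -- str.split with a nonempty separator never returns none / an empty list: getD is unused
  let rows := ((PySem.Str.split? (((PySem.Str.split? fen " ").getD [fen]).headD "") "/").getD [])
  let svg : List String :=
    ["<svg xmlns=\"http://www.w3.org/2000/svg\" width=\"" ++ PySem.Int.toStr board_size ++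
     "\" height=\"" ++ PySem.Int.toStr board_size ++ "\">"]
  let svg := (PySem.List.enumerate rows).foldl pvA_rankStep svg
  PySem.Str.join "\n" (svg ++ ["</svg>"])

-- ===== PORT B =====
-- a digit N becomes N empty cells (int(ch)*[None]; N ≥ 0, so .toNat is exact), a piece stays
def pvB_expandCell (ch : Char) : List (Option Char) :=
  if PySem.Chars.isdigit ch then
    List.replicate ((PySem.Int.ofChars? [ch]).getD 0).toNat (none : Option Char)
  else [some ch]

-- body of B's uniform `for f, cell in enumerate(cells)` loop; sq = 52 inlined (a constant)
def pvB_cellStep (r : Int) (lines : List String) (p : Int × Option Char) : List String :=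
  let f := p.1
  let cell := p.2
  let x := f * 52
  let y := r * 52
  let fill := if (r + f) % 2 == 0 then "#f0d9b5" else "#b58863"
  let lines := lines ++ ["<rect x=\"" ++ PySem.Int.toStr x ++ "\" y=\"" ++ PySem.Int.toStr y ++
            "\" width=\"" ++ PySem.Int.toStr 52 ++ "\" height=\"" ++ PySem.Int.toStr 52 ++
            "\" fill=\"" ++ fill ++ "\"/>"]
  match cell with
  | some c => lines ++ ["<image href=\"" ++ piece_icon c ++ "\" x=\"" ++ PySem.Int.toStr (x + 5) ++
            "\" y=\"" ++ PySem.Int.toStr (y + 5) ++ "\" width=\"" ++ PySem.Int.toStr (52 - 10) ++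
            "\" height=\"" ++ PySem.Int.toStr (52 - 10) ++ "\"/>"]
  | none => lines

-- body of B's `for r, cells in enumerate(grid)` loop
def pvB_rankStep (lines : List String) (p : Int × List (Option Char)) : List String :=
  (PySem.List.enumerate p.2).foldl (pvB_cellStep p.1) lines

def generate_board_svg_alt (fen : String) : String :=
  -- str.split with a nonempty separator never returns none / an empty list: getD is unused
  let grid := ((PySem.Str.split? (((PySem.Str.split? fen " ").getD [fen]).headD "") "/").getD []).map
    (fun row => row.toList.flatMap pvB_expandCell)
  let lines : List String :=
    ["<svg xmlns=\"http://www.w3.org/2000/svg\" width=\"" ++ PySem.Int.toStr (8 * 52) ++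
     "\" height=\"" ++ PySem.Int.toStr (8 * 52) ++ "\">"]
  let lines := (PySem.List.enumerate grid).foldl pvB_rankStep lines
  PySem.Str.join "\n" (lines ++ ["</svg>"])

-- ===== PRECONDITION & SPEC =====
def Spec_generate_board_svg (fen : String) (out : String) : Prop := out = generate_board_svg_alt fen
instance (fen : String) (out : String) : Decidable (Spec_generate_board_svg fen out) := by unfold Spec_generate_board_svg; infer_instance

-- ===== CLAIM (what is proved, stated in full; the proofs are below) =====
def Claim_equal_generate_board_svg : Prop := ∀ (fen : String), Dom_generate_board_svg fen → Spec_generate_board_svg fen (generate_board_svg fen)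

-- ===== LEMMAS AND PROOFS =====

theorem pv_enumerate_append {α : Type} (xs ys : List α) (s : Int) :
    PySem.List.enumerate (xs ++ ys) s
      = PySem.List.enumerate xs s ++ PySem.List.enumerate ys (s + xs.length) := by
  induction xs generalizing s with
  | nil => simp [PySem.List.enumerate_nil]
  | cons x xs ih =>
      simp only [List.cons_append, PySem.List.enumerate_cons, ih, List.length_cons]
      have : s + 1 + (xs.length : Int) = s + ((xs.length : Int) + 1) := by ring
      simp [this]

theorem pv_enumerate_map {α β : Type} (g : α → β) (l : List α) (s : Int) :
    PySem.List.enumerate (l.map g) s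
      = (PySem.List.enumerate l s).map (fun p => (p.1, g p.2)) := by
  induction l generalizing s with
  | nil => simp [PySem.List.enumerate_nil]
  | cons x l ih => simp [PySem.List.enumerate_cons, ih]

-- A's inner digit loop emits exactly B's uniform pass over the corresponding run of empty cells
theorem pv_digit_run (r : Int) (l : List Int) : ∀ (f : Int) (acc : List String),
    l.foldl (pvA_digitStep r) (f, acc)
      = (f + (l.length : Int),
         (PySem.List.enumerate (List.replicate l.length (none : Option Char)) f).foldl
           (pvB_cellStep r) acc) := by
  induction l with
  | nil => intro f acc; simp [PySem.List.enumerate_nil]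
  | cons i l ih =>
      intro f acc
      simp only [List.foldl_cons, List.length_cons, List.replicate_succ,
        PySem.List.enumerate_cons]
      rw [show pvA_digitStep r (f, acc) i
            = (f + 1, pvB_cellStep r acc (f, (none : Option Char))) from rfl]
      rw [ih (f + 1)]
      exact Prod.ext (by push_cast; ring) rfl

-- A's per-character loop over a rank = B's expansion followed by the uniform emission pass
theorem pv_char_run (r : Int) (cs : List Char) : ∀ (f : Int) (acc : List String),
    cs.foldl (pvA_charStep r) (f, acc)
      = (f + ((cs.flatMap pvB_expandCell).length : Int),
         (PySem.List.enumerate (cs.flatMap pvB_expandCell) f).foldl (pvB_cellStep r) acc) := by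
  induction cs with
  | nil => intro f acc; simp [PySem.List.enumerate_nil]
  | cons c cs ih =>
      intro f acc
      simp only [List.foldl_cons, List.flatMap_cons, pv_enumerate_append, List.foldl_append,
        List.length_append]
      by_cases h : PySem.Chars.isdigit c
      · have hexp : pvB_expandCell c
            = List.replicate ((PySem.Int.ofChars? [c]).getD 0).toNat (none : Option Char) := by
          simp [pvB_expandCell, h]
        have hA : pvA_charStep r (f, acc) c
            = (PySem.List.pyRange 0 ((PySem.Int.ofChars? [c]).getD 0) 1).foldl
                (pvA_digitStep r) (f, acc) := by
          simp [pvA_charStep, h]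
        rw [hA, pv_digit_run, ih]
        have hlen : (PySem.List.pyRange 0 ((PySem.Int.ofChars? [c]).getD 0) 1).length
            = (pvB_expandCell c).length := by
          rw [hexp, PySem.List.length_pyRange_one]
          simp
        rw [hlen, hexp]
        simp only [List.length_replicate]
        exact Prod.ext (by push_cast; ring) rfl
      · have hexp : pvB_expandCell c = [some c] := by simp [pvB_expandCell, h]
        have hA : pvA_charStep r (f, acc) c
            = (f + 1, pvB_cellStep r acc (f, (some c : Option Char))) := by
          simp only [pvA_charStep, h, if_neg, Bool.false_eq_true, not_false_eq_true]
          rfl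
        rw [hA, ih, hexp]
        simp only [PySem.List.enumerate_cons, PySem.List.enumerate_nil, List.length_cons,
          List.length_nil, List.foldl_cons, List.foldl_nil]
        exact Prod.ext (by push_cast; ring) rfl

theorem pv_rank_eq (svg : List String) (p : Int × String) :
    pvA_rankStep svg p = pvB_rankStep svg (p.1, p.2.toList.flatMap pvB_expandCell) := by
  unfold pvA_rankStep pvB_rankStep
  rw [pv_char_run]

-- ===== VERDICT (by name: the statement is the Claim_ definition above) =====
theorem generate_board_svg_spec : Claim_equal_generate_board_svg := by
  intro fen _
  unfold Spec_generate_board_svg generate_board_svg generate_board_svg_alt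
  generalize ((PySem.Str.split? (((PySem.Str.split? fen " ").getD [fen]).headD "") "/").getD []) = rows
  simp only [pv_enumerate_map, List.foldl_map]
  have hstep : pvA_rankStep
      = fun (x : List String) (y : Int × String) =>
          pvB_rankStep x (y.1, List.flatMap pvB_expandCell y.2.toList) := by
    funext x y
    exact pv_rank_eq x y
  rw [hstep]
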